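-- pv_equiv track=rewrite | github.com/EmilUsmanov/1440 | ex01.py | min_points_to_cover_segments
-- ===== SOURCE A (Python) =====
-- from typing import List, Tuple
--
-- def min_points_to_cover_segments(segments: List[Tuple[int, int]]) -> List[int]:
--     # Шаг 1: Отсортировать отрезки по правой границе
--     sorted_segments = sorted(segments, key=lambda seg: seg[1])
--
--     points = []
--     last_point = None
--
--     for seg in sorted_segments:
--         start, end = seg
--         # Если текущий отрезок не покрыт последней точкой
--         if last_point is None or last_point < start:
--             # Выбираем правый конец отрезка как новую точку
--             last_point = end
--             points.append(last_point)
--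
--     return points
-- ===== SOURCE B (Python) =====
-- def min_points_to_cover_segments(segments):
--     remaining = sorted(segments, key=lambda seg: seg[1])
--     points = []
--     while remaining:
--         point = remaining[0][1]
--         points.append(point)
--         remaining = [seg for seg in remaining[1:] if seg[0] > point]
--     return points
-- ===== Notes on version B (the rewrite author's own statement) =====
-- stated objective: alternative
-- what changed: Replaces A's single guarded pass carrying a last_point state with a rebuild loop: repeatedly take the right endpoint of the first remaining sorted segment as a point and re-filter the remaining list to segments starting strictly after it.
import Mathlib
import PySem

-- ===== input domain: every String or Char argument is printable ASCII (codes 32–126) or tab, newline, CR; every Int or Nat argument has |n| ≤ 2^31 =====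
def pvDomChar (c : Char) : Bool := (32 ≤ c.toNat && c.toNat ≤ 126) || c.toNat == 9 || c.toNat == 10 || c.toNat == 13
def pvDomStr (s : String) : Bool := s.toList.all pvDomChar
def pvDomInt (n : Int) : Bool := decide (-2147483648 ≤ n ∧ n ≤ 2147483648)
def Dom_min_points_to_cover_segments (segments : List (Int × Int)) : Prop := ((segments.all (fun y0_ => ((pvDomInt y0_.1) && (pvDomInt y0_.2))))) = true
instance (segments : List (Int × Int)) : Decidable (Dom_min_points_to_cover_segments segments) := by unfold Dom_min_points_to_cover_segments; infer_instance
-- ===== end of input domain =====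

-- B restates A's greedy single pass as a rebuild loop: pick the first remaining segment's
-- right endpoint, then re-filter the remaining segments; objective: alternative decomposition.

-- ===== PORT A =====
def min_points_to_cover_segments (segments : List (Int × Int)) : List Int :=
  let sorted_segments := PySem.List.sorted segments (key := fun seg => seg.2)
  let acc := sorted_segments.foldl
    (fun (st : List Int × Option Int) seg =>
      match st.2 with
      | none => (st.1 ++ [seg.2], some seg.2)
      | some p => if p < seg.1 then (st.1 ++ [seg.2], some seg.2) else st)
    ([], none)
  acc.1

-- ===== PORT B =====
-- the rebuild loop of Source B: take first remaining right endpoint, re-filter, repeat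
def pvRebuild (remaining : List (Int × Int)) : List Int :=
  match remaining with
  | [] => []
  | seg :: rest => seg.2 :: pvRebuild (rest.filter (fun q => decide (seg.2 < q.1)))
termination_by remaining.length
decreasing_by
  have h1 := List.length_filter_le (fun x : {x // x ∈ rest} => decide (seg.2 < (x : Int × Int).1)) rest.attach
  simp at h1 ⊢
  omega

def min_points_to_cover_segments_alt (segments : List (Int × Int)) : List Int :=
  pvRebuild (PySem.List.sorted segments (key := fun seg => seg.2))

-- ===== PRECONDITION & SPEC =====
def Spec_min_points_to_cover_segments (segments : List (Int × Int)) (out : List Int) : Prop := out = min_points_to_cover_segments_alt segments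
instance (segments : List (Int × Int)) (out : List Int) : Decidable (Spec_min_points_to_cover_segments segments out) := by unfold Spec_min_points_to_cover_segments; infer_instance

-- ===== CLAIM (what is proved, stated in full; the proofs are below) =====
def Claim_equal_min_points_to_cover_segments : Prop := ∀ (segments : List (Int × Int)), Dom_min_points_to_cover_segments segments → Spec_min_points_to_cover_segments segments (min_points_to_cover_segments segments)

-- ===== LEMMAS AND PROOFS =====

theorem pvRebuild_nil : pvRebuild [] = [] := by rw [pvRebuild.eq_def]

theorem pvRebuild_cons (seg : Int × Int) (rest : List (Int × Int)) :
    pvRebuild (seg :: rest) = seg.2 :: pvRebuild (rest.filter (fun q => decide (seg.2 < q.1))) := by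
  rw [pvRebuild.eq_def]

-- A's loop body without the accumulator: output produced from state `lp`
def pvPass (l : List (Int × Int)) (lp : Option Int) : List Int :=
  match l, lp with
  | [], _ => []
  | seg :: t, none => seg.2 :: pvPass t (some seg.2)
  | seg :: t, some p => if p < seg.1 then seg.2 :: pvPass t (some seg.2) else pvPass t (some p)

theorem pvFoldl_eq_pass (l : List (Int × Int)) (acc : List Int) (lp : Option Int) :
    (l.foldl
      (fun (st : List Int × Option Int) seg =>
        match st.2 with
        | none => (st.1 ++ [seg.2], some seg.2)
        | some p => if p < seg.1 then (st.1 ++ [seg.2], some seg.2) else st)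
      (acc, lp)).1 = acc ++ pvPass l lp := by
  induction l generalizing acc lp with
  | nil => simp [pvPass]
  | cons seg t ih =>
    cases lp with
    | none => simp [List.foldl_cons, pvPass, ih]
    | some p =>
      by_cases h : p < seg.1 <;> simp [List.foldl_cons, pvPass, h, ih]

theorem pvPass_some_eq_rebuild (l : List (Int × Int)) :
    l.Pairwise (fun a b => a.2 ≤ b.2) →
    ∀ (p : Int), (∀ q ∈ l, p ≤ q.2) →
      pvPass l (some p) = pvRebuild (l.filter (fun q => decide (p < q.1))) := by
  induction l with
  | nil => intro _ p hp; simp [pvPass, pvRebuild_nil]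
  | cons seg t ih0 =>
    intro hs p hp
    have ih := ih0 (List.pairwise_cons.mp hs).2
    have hhead : ∀ q ∈ t, seg.2 ≤ q.2 := (List.pairwise_cons.mp hs).1
    by_cases h : p < seg.1
    · have hpe : p ≤ seg.2 := hp seg (List.mem_cons_self ..)
      have hfilter : (t.filter (fun q => decide (p < q.1))).filter
          (fun q => decide (seg.2 < q.1)) = t.filter (fun q => decide (seg.2 < q.1)) := by
        rw [List.filter_filter]
        apply List.filter_congr
        intro q hq
        by_cases h2 : seg.2 < q.1 <;> simp [h2]
        omega
      rw [List.filter_cons_of_pos (by simpa using h), pvRebuild_cons, hfilter]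
      simp only [pvPass, if_pos h]
      exact congrArg _ (ih seg.2 hhead)
    · rw [List.filter_cons_of_neg (by simpa using h)]
      simp only [pvPass, if_neg h]
      exact ih p (fun q hq => hp q (List.mem_cons_of_mem _ hq))

theorem pvPass_none_eq_rebuild (l : List (Int × Int))
    (hs : l.Pairwise (fun a b => a.2 ≤ b.2)) :
    pvPass l none = pvRebuild l := by
  cases l with
  | nil => simp [pvPass, pvRebuild_nil]
  | cons seg t =>
    rw [pvRebuild_cons]
    show seg.2 :: pvPass t (some seg.2) = _
    exact congrArg _ (pvPass_some_eq_rebuild t (List.pairwise_cons.mp hs).2 seg.2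
      (List.pairwise_cons.mp hs).1)

-- ===== VERDICT (by name: the statement is the Claim_ definition above) =====
theorem min_points_to_cover_segments_spec : Claim_equal_min_points_to_cover_segments := by
  intro segments _
  unfold Spec_min_points_to_cover_segments min_points_to_cover_segments min_points_to_cover_segments_alt
  rw [pvFoldl_eq_pass, List.nil_append]
  exact pvPass_none_eq_rebuild _ (PySem.List.sorted_pairwise ..)
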